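-- pv_equiv track=rewrite | github.com/rotemfogel/python-playground | test.py | do_search_and_preplace_foreach
-- ===== SOURCE A (Python) =====
-- def verify_args(string, char_seq, pre_char):
--     if not all([string, char_seq, pre_char]):
--         raise ValueError(f"missing mandatory args: {string=}, {char_seq=}, {pre_char=}")
--
-- def do_search_and_preplace_foreach(string, char_seq, pre_char):
--     verify_args(string, char_seq, pre_char)
--     accum = ""
--     for pos, val in enumerate(string):
--         if pos + len(char_seq) <= len(string):
--             if string[pos : pos + len(char_seq)] == char_seq:
--                 accum += pre_char
--         accum += val
--     return accum
-- ===== SOURCE B (Python) =====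
-- def do_search_and_preplace_foreach(string, char_seq, pre_char):
--     if not all([string, char_seq, pre_char]):
--         raise ValueError(f"missing mandatory args: {string=}, {char_seq=}, {pre_char=}")
--     parts = []
--     prev = 0
--     i = 0
--     while True:
--         j = string.find(char_seq, i)
--         if j == -1:
--             break
--         parts.append(string[prev:j])
--         parts.append(pre_char)
--         prev = j
--         i = j + 1
--     parts.append(string[prev:])
--     return "".join(parts)
-- ===== Notes on version B (the rewrite author's own statement) =====
-- stated objective: faster
-- what changed: A checks a fresh slice comparison at every position and appends char by char; B jumps between overlapping occurrences with repeated str.find(char_seq, i) and copies the untouched spans between matches in blocks, joining the parts once.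
import Mathlib
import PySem

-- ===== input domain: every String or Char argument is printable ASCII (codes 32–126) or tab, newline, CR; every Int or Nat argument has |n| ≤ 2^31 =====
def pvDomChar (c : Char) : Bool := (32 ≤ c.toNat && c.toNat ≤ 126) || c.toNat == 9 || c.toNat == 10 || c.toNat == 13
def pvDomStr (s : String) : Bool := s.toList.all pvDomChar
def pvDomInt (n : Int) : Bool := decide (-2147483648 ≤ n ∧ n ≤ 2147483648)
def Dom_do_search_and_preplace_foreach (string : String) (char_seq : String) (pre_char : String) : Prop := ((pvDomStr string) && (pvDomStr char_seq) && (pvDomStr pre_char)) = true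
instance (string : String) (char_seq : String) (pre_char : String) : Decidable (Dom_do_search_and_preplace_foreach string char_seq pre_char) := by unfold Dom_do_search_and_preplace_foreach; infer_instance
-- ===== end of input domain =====

-- B replaces A's per-position slice comparison by jumping between overlapping occurrences
-- with str.find and copying the untouched spans in blocks; return values agree on every
-- input where A returns (Pre_ excludes only the inputs where A raises ValueError).

-- ===== PORT A =====
-- A: accum = ""; for pos, val in enumerate(string): if pos+len(seq) <= len(string):
--    if string[pos:pos+len(seq)] == seq: accum += pre_char;  accum += val
def do_search_and_preplace_foreach (string : String) (char_seq : String) (pre_char : String) : String :=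
  let s := string.toList
  let q := char_seq.toList
  let p := pre_char.toList
  String.ofList <|
    (PySem.List.enumerate s 0).foldl
      (fun accum pv =>
        (if pv.1 + (q.length : Int) ≤ (s.length : Int) then
          (if PySem.List.slice s (some pv.1) (some (pv.1 + (q.length : Int))) = q then accum ++ p
           else accum)
         else accum) ++ [pv.2])
      []

-- ===== PORT B =====
-- B's while-loop: j = string.find(char_seq, i); if j == -1: break;
-- parts += [string[prev:j], pre_char]; prev, i = j, j + 1 — ported with fuel as totality guard.
def pvBLoop (s q p : List Char) (fuel prev i : Nat) : List (List Char) :=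
  match fuel with
  | 0 => [PySem.List.slice s (some (prev : Int)) none]           -- fuel guard (never reached from the entry call)
  | fuel + 1 =>
    let j := PySem.Chars.findFrom s q (i : Int) none
    if j = -1 then [PySem.List.slice s (some (prev : Int)) none] -- break; parts.append(string[prev:])
    else PySem.List.slice s (some (prev : Int)) (some j) :: p :: pvBLoop s q p fuel j.toNat (j.toNat + 1)

def do_search_and_preplace_foreach_alt (string : String) (char_seq : String) (pre_char : String) : String :=
  let s := string.toList
  let q := char_seq.toList
  let p := pre_char.toList
  String.ofList <| PySem.Chars.join [] (pvBLoop s q p (s.length + 1) 0 0)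

-- ===== PRECONDITION & SPEC =====
-- Pre_ excludes exactly the inputs on which A's verify_args raises ValueError (some empty argument).
def Pre_do_search_and_preplace_foreach (string : String) (char_seq : String) (pre_char : String) : Prop :=
  string ≠ "" ∧ char_seq ≠ "" ∧ pre_char ≠ ""
instance (string : String) (char_seq : String) (pre_char : String) : Decidable (Pre_do_search_and_preplace_foreach string char_seq pre_char) := by unfold Pre_do_search_and_preplace_foreach; infer_instance

def pvWitness_do_search_and_preplace_foreach : String × String × String := ("abcabc", "bc", "-")

def Spec_do_search_and_preplace_foreach (string : String) (char_seq : String) (pre_char : String) (out : String) : Prop := out = do_search_and_preplace_foreach_alt string char_seq pre_char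
instance (string : String) (char_seq : String) (pre_char : String) (out : String) : Decidable (Spec_do_search_and_preplace_foreach string char_seq pre_char out) := by unfold Spec_do_search_and_preplace_foreach; infer_instance

-- ===== CLAIM (what is proved, stated in full; the proofs are below) =====
def Claim_equal_do_search_and_preplace_foreach : Prop := ∀ (string : String) (char_seq : String) (pre_char : String), Dom_do_search_and_preplace_foreach string char_seq pre_char → Pre_do_search_and_preplace_foreach string char_seq pre_char → Spec_do_search_and_preplace_foreach string char_seq pre_char (do_search_and_preplace_foreach string char_seq pre_char)

-- ===== LEMMAS AND PROOFS =====

theorem pvJoin_nil (l : List (List Char)) : PySem.Chars.join [] l = l.flatten := by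
  induction l with
  | nil => rfl
  | cons a r ih =>
    cases r with
    | nil => simp [PySem.Chars.join_singleton]
    | cons b r' => rw [PySem.Chars.join_cons_cons]; simp_all

-- Reference rendering: before each suffix position emit p iff q is a prefix of that suffix, then the char.
def pvRender (q p : List Char) : List Char → List Char
  | [] => []
  | c :: t => (if q <+: (c :: t) then p else []) ++ c :: pvRender q p t

theorem pvRender_eq_self (q p s : List Char) (h : ∀ k, ¬ q <+: s.drop k) :
    pvRender q p s = s := by
  induction s with
  | nil => rfl
  | cons c t ih =>
    have h0 := h 0
    simp only [List.drop_zero] at h0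
    simp only [pvRender, h0, if_false, List.nil_append, List.cons.injEq, true_and]
    exact ih (fun k => by simpa using h (k + 1))

-- A's guarded slice test at position k is exactly "q is a prefix of the suffix at k".
theorem pvA_test (s q : List Char) (k : Nat) (hks : k < s.length) :
    ((k : Int) + (q.length : Int) ≤ (s.length : Int) ∧
      PySem.List.slice s (some (k : Int)) (some ((k : Int) + (q.length : Int))) = q)
    ↔ q <+: s.drop k := by
  rw [PySem.List.slice_natCast_add]
  constructor
  · rintro ⟨_, hsl⟩
    exact hsl ▸ List.take_prefix _ _
  · intro hp
    have hlen : q.length ≤ (s.drop k).length := hp.length_le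
    have hk : k + q.length ≤ s.length := by
      simp only [List.length_drop] at hlen; omega
    refine ⟨by exact_mod_cast hk, ?_⟩
    exact (List.prefix_iff_eq_take.mp hp).symm

-- A's foldl over the enumeration renders the suffixes one by one.
theorem pvA_foldl (s q p : List Char) (t : List Char) (k : Nat) (acc : List Char)
    (ht : t = s.drop k) :
    (PySem.List.enumerate t (k : Int)).foldl
      (fun accum pv =>
        (if pv.1 + (q.length : Int) ≤ (s.length : Int) then
          (if PySem.List.slice s (some pv.1) (some (pv.1 + (q.length : Int))) = q then accum ++ p
           else accum)
         else accum) ++ [pv.2]) acc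
    = acc ++ pvRender q p t := by
  induction t generalizing k acc with
  | nil => simp [PySem.List.enumerate_nil, pvRender]
  | cons c t' ih =>
    rw [PySem.List.enumerate_cons]
    simp only [List.foldl_cons]
    have ht' : t' = s.drop (k + 1) := by
      have := congrArg List.tail ht
      simpa [List.tail_drop] using this
    have hcast : (k : Int) + 1 = ((k + 1 : Nat) : Int) := by push_cast; ring
    rw [hcast, ih (k + 1) _ ht']
    have hks : k < s.length := by
      have hne : s.drop k ≠ [] := by rw [← ht]; simp
      rw [ne_eq, List.drop_eq_nil_iff] at hne; omega
    have htest := pvA_test s q k hks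
    rw [← ht] at htest
    by_cases hm : q <+: (c :: t')
    · have := htest.mpr hm
      simp only [pvRender, hm, if_true, this.1, this.2, List.append_assoc, List.cons_append,
        List.nil_append]
    · have hnot := htest.not.mpr hm
      push Not at hnot
      simp only [pvRender, hm, if_false, List.nil_append]
      split_ifs with h1 h2
      · exact absurd (hnot h1) (by simp [h2])
      · simp
      · simp

-- find (from i) skips a matchless block: rendering from i copies raw chars up to the first match j.
theorem pvRender_skip (s q p : List Char) (i j : Nat) (hij : i ≤ j) (hj : j < s.length)
    (hmin : ∀ pos, i ≤ pos → pos < j → ¬ q <+: s.drop pos) :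
    pvRender q p (s.drop i) = (s.drop i).take (j - i) ++ pvRender q p (s.drop j) := by
  induction hd : j - i generalizing i with
  | zero =>
    have : i = j := by omega
    simp [this]
  | succ d ihd =>
    have hi : i < s.length := by omega
    rw [List.drop_eq_getElem_cons hi]
    have hnm : ¬ q <+: s.drop i := hmin i le_rfl (by omega)
    rw [List.drop_eq_getElem_cons hi] at hnm
    simp only [pvRender, hnm, if_false, List.nil_append, List.take_succ_cons, List.cons_append,
      List.cons.injEq, true_and]
    have := ihd (i + 1) (by omega) (fun pos h1 h2 => hmin pos (by omega) h2) (by omega)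
    rw [← List.drop_drop] at this
    simpa using this

-- B's loop invariant: prev..i-1 are already emitted raw, everything from i is still to render.
theorem pvB_loop (s q p : List Char) (hq : q ≠ []) :
    ∀ (fuel i prev : Nat), prev ≤ i → i ≤ s.length → s.length + 1 ≤ i + fuel →
    PySem.Chars.join [] (pvBLoop s q p fuel prev i)
      = (s.drop prev).take (i - prev) ++ pvRender q p (s.drop i) := by
  intro fuel
  induction fuel with
  | zero => intro i prev _ h2 h3; omega
  | succ fuel ih =>
    intro i prev h1 h2 h3
    rw [pvBLoop]
    by_cases hj : PySem.Chars.findFrom s q (i : Int) none = -1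
    · -- no further occurrence: the rest is raw
      have hnone := (PySem.Chars.findFrom_natCast_eq_neg_one_iff s q i h2).mp hj
      have hraw : ∀ k, ¬ q <+: (s.drop i).drop k := by
        intro k hk
        exact hnone (hk.isInfix.trans (List.drop_suffix k (s.drop i)).isInfix)
      simp only [hj, if_true]
      rw [PySem.Chars.join_singleton, PySem.List.slice_from_natCast,
        pvRender_eq_self q p _ hraw]
      have hdd : s.drop i = (s.drop prev).drop (i - prev) := by
        rw [List.drop_drop]; congr 1; omega
      rw [hdd, List.take_append_drop]
    · -- an occurrence at j: copy the raw block, emit p, continue after j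
      simp only [hj, if_false]
      have hspec := PySem.Chars.findFrom_natCast_spec s q i h2 hj
      set j : Int := PySem.Chars.findFrom s q (i : Int) none with hjdef
      obtain ⟨hij, hpref, hmin⟩ := hspec
      have hjnn : 0 ≤ j := le_trans (by exact_mod_cast Nat.zero_le i) hij
      have hjle : j ≤ (s.length : Int) := by
        have hfe := PySem.Chars.findFrom_natCast s q i h2
        rw [← hjdef] at hfe
        have hfl := PySem.Chars.find_le_length (s.drop i) q
        simp only [List.length_drop] at hfl
        rw [hfe]
        split
        · omega
        · have : ((s.length - i : Nat) : Int) ≤ (s.length : Int) - (i : Int) + 1 := by omega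
          omega
      have hjlen : j.toNat ≤ s.length := by omega
      have hjlt : j.toNat < s.length := by
        rcases Nat.lt_or_ge j.toNat s.length with h | h
        · exact h
        · exfalso
          have : j.toNat = s.length := by omega
          rw [this, List.drop_length] at hpref
          exact hq (List.prefix_nil.mp hpref)
      have hij' : i ≤ j.toNat := by omega
      have hrec := ih (j.toNat + 1) j.toNat (by omega) (by omega) (by omega)
      -- assemble: slice prev..j, then p, then the recursive tail
      rw [pvJoin_nil] at hrec ⊢
      simp only [List.flatten_cons]
      rw [hrec]
      have hslice : PySem.List.slice s (some (prev : Int)) (some j)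
          = (s.drop prev).take (j.toNat - prev) := by
        rw [PySem.List.slice_toNat s (by exact_mod_cast Nat.zero_le prev) hjnn]
        simp
      rw [hslice]
      have htake1 : (s.drop j.toNat).take (j.toNat + 1 - j.toNat) = [s[j.toNat]] := by
        have h1' : j.toNat + 1 - j.toNat = 1 := by omega
        rw [h1', List.drop_eq_getElem_cons hjlt, List.take_succ_cons, List.take_zero]
      rw [htake1]
      rw [pvRender_skip s q p i j.toNat hij' hjlt hmin]
      have hrend : pvRender q p (s.drop j.toNat)
          = p ++ s[j.toNat] :: pvRender q p (s.drop (j.toNat + 1)) := by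
        rw [List.drop_eq_getElem_cons hjlt] at hpref ⊢
        simp only [pvRender]
        rw [if_pos hpref]
      rw [hrend]
      have hdrop : s.drop i = (s.drop prev).drop (i - prev) := by
        rw [List.drop_drop]; congr 1; omega
      have hglue : (s.drop prev).take (i - prev) ++ (s.drop i).take (j.toNat - i)
          = (s.drop prev).take (j.toNat - prev) := by
        rw [hdrop, ← List.take_add]
        congr 1; omega
      rw [← hglue]
      simp [List.append_assoc]
-- ===== VERDICT (by name: the statement is the Claim_ definition above) =====
theorem do_search_and_preplace_foreach_spec : Claim_equal_do_search_and_preplace_foreach := by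
  intro string char_seq pre_char _ hpre
  unfold Spec_do_search_and_preplace_foreach
  unfold do_search_and_preplace_foreach do_search_and_preplace_foreach_alt
  have hq : char_seq.toList ≠ [] := by
    intro h
    exact hpre.2.1 (String.toList_eq_nil_iff.mp h)
  have hA := pvA_foldl string.toList char_seq.toList pre_char.toList string.toList 0 [] (by simp)
  have hB := pvB_loop string.toList char_seq.toList pre_char.toList hq
      (string.toList.length + 1) 0 0 le_rfl (Nat.zero_le _) (by omega)
  simp only [Nat.cast_zero] at hA
  show String.ofList
      ((PySem.List.enumerate string.toList 0).foldl
        (fun accum pv =>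
          (if pv.1 + (char_seq.toList.length : Int) ≤ (string.toList.length : Int) then
            (if PySem.List.slice string.toList (some pv.1)
                  (some (pv.1 + (char_seq.toList.length : Int))) = char_seq.toList then
              accum ++ pre_char.toList
             else accum)
           else accum) ++ [pv.2]) [])
    = String.ofList (PySem.Chars.join []
        (pvBLoop string.toList char_seq.toList pre_char.toList (string.toList.length + 1) 0 0))
  rw [hA, hB]
  simp
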